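-- pv_equiv track=rewrite | github.com/dawoodaijaz97/Leetcode | count-prime-gap-balanced-subarrays/solution.py | solve
-- ===== SOURCE A (Python) =====
-- def is_prime(n: int) -> bool:
--     if n <= 1:
--         return False
--     if n <= 3:
--         return True
--     if n % 2 == 0 or n % 3 == 0:
--         return False
--     i = 5
--     while i * i <= n:
--         if n % i == 0 or n % (i + 2) == 0:
--             return False
--         i += 6
--     return True
--
-- def solve(nums: list[int], k: int) -> int:
--     zelmoricad = len(nums) // 2  # Store the input midway
--     prime_indices = [i for i, num in enumerate(nums) if is_prime(num)]
--
--     count = 0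
--     n = len(prime_indices)
--
--     for i in range(n):
--         min_prime = nums[prime_indices[i]]
--         for j in range(i + 1, n):
--             max_prime = nums[prime_indices[j]]
--             if max_prime - min_prime <= k:
--                 count += j - i
--             else:
--                 break
--
--     return count
-- ===== SOURCE B (Python) =====
-- def is_prime(n: int) -> bool:
--     if n <= 1:
--         return False
--     if n <= 3:
--         return True
--     if n % 2 == 0 or n % 3 == 0:
--         return False
--     i = 5
--     while i * i <= n:
--         if n % i == 0 or n % (i + 2) == 0:
--             return False
--         i += 6
--     return True
--
-- def solve(nums: list[int], k: int) -> int: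
--     # Keep only the prime values; for each suffix head v, the run of following
--     # values within k of v contributes a triangular number in closed form.
--     vals = [x for x in nums if is_prime(x)]
--     total = 0
--     rest = vals
--     while rest:
--         v = rest[0]
--         rest = rest[1:]
--         m = 0
--         for w in rest:
--             if w - v > k:
--                 break
--             m += 1
--         total += m * (m + 1) // 2
--     return total
-- ===== Notes on version B (the rewrite author's own statement) =====
-- stated objective: simpler
-- what changed: B filters out the prime values once, then for each suffix head counts the run of following values within k and adds the triangular closed form m*(m+1)//2, replacing A's index-list bookkeeping and inner offset-accumulating loop.
import Mathlib
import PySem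

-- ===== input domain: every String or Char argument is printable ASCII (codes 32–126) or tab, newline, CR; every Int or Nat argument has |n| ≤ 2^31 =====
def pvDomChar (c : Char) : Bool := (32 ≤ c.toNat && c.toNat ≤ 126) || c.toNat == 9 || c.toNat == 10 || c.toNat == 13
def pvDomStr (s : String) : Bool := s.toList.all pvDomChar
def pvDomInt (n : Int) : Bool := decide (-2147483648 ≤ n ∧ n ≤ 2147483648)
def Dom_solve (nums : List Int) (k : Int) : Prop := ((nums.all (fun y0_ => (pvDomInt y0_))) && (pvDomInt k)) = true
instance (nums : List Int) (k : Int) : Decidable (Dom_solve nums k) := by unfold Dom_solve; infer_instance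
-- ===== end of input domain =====

-- B replaces A's inner accumulation of offsets by a run length and a triangular closed form over the filtered prime values; objective: simpler.

-- ===== PORT A =====
-- shared helper: is_prime (identical in Source A and Source B)
def ipLoop (n : Int) (i : Int) : Bool :=
  if h : 1 ≤ i ∧ i * i ≤ n then
    if PySem.Int.mod n i == 0 || PySem.Int.mod n (i + 2) == 0 then false
    else ipLoop n (i + 6)
  else true
termination_by (n + 1 - i).toNat
decreasing_by
  have h1 : i ≤ i * i := le_mul_of_one_le_left (by omega) h.1
  omega

def is_prime (n : Int) : Bool :=
  if n ≤ 1 then false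
  else if n ≤ 3 then true
  else if PySem.Int.mod n 2 == 0 || PySem.Int.mod n 3 == 0 then false
  else ipLoop n 5

-- inner 'for j in range(i+1, n)' loop of A, with its break
def innerA (nums : List Int) (k : Int) (pis : List Int) (minp i : Int) :
    List Int → Int → Int
  | [], c => c
  | j :: js, c =>
    let maxp := PySem.List.pyGetD nums (PySem.List.pyGetD pis j 0) 0
    if maxp - minp ≤ k then innerA nums k pis minp i js (c + (j - i)) else c

def solve (nums : List Int) (k : Int) : Int :=
  let _zelmoricad := PySem.Int.floordiv (nums.length : Int) 2
  let prime_indices :=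
    ((PySem.List.enumerate nums).filter (fun p => is_prime p.2)).map (·.1)
  let n : Int := (prime_indices.length : Int)
  (PySem.List.pyRange 0 n 1).foldl
    (fun count i =>
      let min_prime := PySem.List.pyGetD nums (PySem.List.pyGetD prime_indices i 0) 0
      innerA nums k prime_indices min_prime i (PySem.List.pyRange (i + 1) n 1) count)
    0

-- ===== PORT B =====
-- 'for w in rest: if w - v > k: break; m += 1'
def runLenB (k v : Int) : List Int → Int → Int
  | [], m => m
  | w :: ws, m => if w - v > k then m else runLenB k v ws (m + 1)

-- 'while rest: v = rest[0]; rest = rest[1:]; …'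
def bLoop (k : Int) : List Int → Int → Int
  | [], total => total
  | v :: rest, total =>
    let m := runLenB k v rest 0
    bLoop k rest (total + PySem.Int.floordiv (m * (m + 1)) 2)

def solve_alt (nums : List Int) (k : Int) : Int :=
  bLoop k (nums.filter (fun x => is_prime x)) 0

-- ===== PRECONDITION & SPEC =====
def Spec_solve (nums : List Int) (k : Int) (out : Int) : Prop := out = solve_alt nums k
instance (nums : List Int) (k : Int) (out : Int) : Decidable (Spec_solve nums k out) := by unfold Spec_solve; infer_instance

-- ===== CLAIM (what is proved, stated in full; the proofs are below) =====
def Claim_equal_solve : Prop := ∀ (nums : List Int) (k : Int), Dom_solve nums k → Spec_solve nums k (solve nums k)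

-- ===== LEMMAS AND PROOFS =====

-- run length as a Nat (proof-side)
def runLenN (k v : Int) : List Int → Nat
  | [] => 0
  | w :: ws => if w - v ≤ k then runLenN k v ws + 1 else 0

-- sum of offsets d, d+1, …, d+m-1 (what A's inner loop adds)
def offSum (d : Int) : Nat → Int
  | 0 => 0
  | m + 1 => d + offSum (d + 1) m

-- common mathematical value on the list of prime values
def G (k : Int) : List Int → Int
  | [] => 0
  | v :: rest => offSum 1 (runLenN k v rest) + G k rest

theorem runLenB_eq (k v : Int) (l : List Int) (m : Int) :
    runLenB k v l m = m + (runLenN k v l : Int) := by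
  induction l generalizing m with
  | nil => simp [runLenB, runLenN]
  | cons w ws ih =>
    by_cases h : w - v > k
    · simp only [runLenB, runLenN, if_pos h, if_neg (by omega : ¬ (w - v ≤ k))]
      simp
    · simp only [runLenB, runLenN, if_neg h, if_pos (by omega : w - v ≤ k), ih]
      push_cast; omega

theorem two_mul_offSum (d : Int) (m : Nat) :
    2 * offSum d m = m * (2 * d + m - 1) := by
  induction m generalizing d with
  | zero => simp [offSum]
  | succ m ih =>
    simp only [offSum]
    rw [mul_add, ih]
    push_cast; ring

theorem floordiv_tri (m : Nat) :
    PySem.Int.floordiv ((m : Int) * ((m : Int) + 1)) 2 = offSum 1 m := by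
  rw [PySem.Int.floordiv_eq_ediv_of_pos (by omega)]
  have h2 : (m : Int) * ((m : Int) + 1) = 2 * offSum 1 m := by
    rw [two_mul_offSum]; ring
  rw [h2, Int.mul_ediv_cancel_left _ (by norm_num)]

theorem bLoop_eq (k : Int) (l : List Int) (t : Int) :
    bLoop k l t = t + G k l := by
  induction l generalizing t with
  | nil => simp [bLoop, G]
  | cons v rest ih =>
    simp only [bLoop, G, ih, runLenB_eq, zero_add, floordiv_tri]
    ring

-- values read by A through prime_indices are the filtered values
theorem compat (nums : List Int) (jn : Nat)
    (hj : jn < (((PySem.List.enumerate nums).filter (fun p => is_prime p.2)).length)) :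
    PySem.List.pyGetD nums
      (PySem.List.pyGetD (((PySem.List.enumerate nums).filter (fun p => is_prime p.2)).map (·.1)) (jn : Int) 0) 0
    = ((((PySem.List.enumerate nums).filter (fun p => is_prime p.2)).map (·.2))).getD jn 0 := by
  set F := (PySem.List.enumerate nums).filter (fun p => is_prime p.2) with hF
  have hjm : jn < (F.map (·.1)).length := by simpa using hj
  have hjs : jn < (F.map (·.2)).length := by simpa using hj
  rw [PySem.List.pyGetD_natCast, List.getD_eq_getElem _ _ hjm, List.getD_eq_getElem _ _ hjs]
  have hmem : F[jn] ∈ F := List.getElem_mem hj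
  have hEn : F[jn] ∈ PySem.List.enumerate nums := List.mem_of_mem_filter hmem
  rcases (PySem.List.mem_enumerate_iff _ _ _).1 hEn with ⟨kk, hk, hp⟩
  simp only [List.getElem_map]
  rw [hp]
  simp [PySem.List.pyGetD_natCast]
  simp [List.getElem?_eq_getElem hk]

theorem compat' (nums : List Int) : ∀ jn : Nat,
    jn < (((PySem.List.enumerate nums).filter (fun p => is_prime p.2)).map (·.2)).length →
      PySem.List.pyGetD nums
        (PySem.List.pyGetD (((PySem.List.enumerate nums).filter (fun p => is_prime p.2)).map (·.1)) (jn : Int) 0) 0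
      = (((PySem.List.enumerate nums).filter (fun p => is_prime p.2)).map (·.2)).getD jn 0 :=
  fun jn hj => compat nums jn (by simpa using hj)

theorem innerGen (nums : List Int) (k : Int) (pis vals : List Int)
    (hlen : pis.length = vals.length)
    (hcompat : ∀ jn : Nat, jn < vals.length →
      PySem.List.pyGetD nums (PySem.List.pyGetD pis (jn : Int) 0) 0 = vals.getD jn 0)
    (minp i : Int) :
    ∀ (l : List Int) (s c : Int), 0 ≤ s → s.toNat ≤ vals.length → l = vals.drop s.toNat →
      innerA nums k pis minp i (PySem.List.pyRange s (pis.length : Int) 1) c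
        = c + offSum (s - i) (runLenN k minp l) := by
  intro l
  induction l with
  | nil =>
    intro s c hs hsle hdrop
    have hge : vals.length ≤ s.toNat := by
      have := (List.drop_eq_nil_iff).1 hdrop.symm
      omega
    rw [PySem.List.pyRange_one_eq_nil (by omega)]
    simp [innerA, runLenN, offSum]
  | cons w ws ih =>
    intro s c hs hsle hdrop
    have hlt : s.toNat < vals.length := by
      by_contra hcon
      rw [List.drop_eq_nil_iff.2 (by omega)] at hdrop
      simp at hdrop
    have hsn : s < (pis.length : Int) := by omega
    rw [PySem.List.pyRange_one_cons hsn]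
    have hw : vals.getD s.toNat 0 = w := by
      rw [List.getD_eq_getElem _ _ hlt]
      have h0 : (vals.drop s.toNat)[0]'(by rw [← hdrop]; simp) = w := by
        simp [← hdrop]
      rw [List.getElem_drop] at h0
      simpa using h0
    have hmax : PySem.List.pyGetD nums (PySem.List.pyGetD pis s 0) 0 = w := by
      have := hcompat s.toNat hlt
      rwa [Int.toNat_of_nonneg hs, hw] at this
    show (if PySem.List.pyGetD nums (PySem.List.pyGetD pis s 0) 0 - minp ≤ k then
            innerA nums k pis minp i (PySem.List.pyRange (s + 1) (pis.length : Int) 1) (c + (s - i))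
          else c) = _
    rw [hmax]
    by_cases hbr : w - minp ≤ k
    · rw [if_pos hbr]
      have hws : ws = vals.drop (s + 1).toNat := by
        have : (s + 1).toNat = s.toNat + 1 := by omega
        rw [this, ← List.drop_drop, ← hdrop]
        simp
      rw [ih (s + 1) (c + (s - i)) (by omega) (by omega) hws]
      simp only [runLenN, if_pos hbr, offSum]
      ring_nf
    · rw [if_neg hbr]
      simp [runLenN, hbr, offSum]

theorem outerGen (nums : List Int) (k : Int) (pis vals : List Int)
    (hlen : pis.length = vals.length)
    (hcompat : ∀ jn : Nat, jn < vals.length →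
      PySem.List.pyGetD nums (PySem.List.pyGetD pis (jn : Int) 0) 0 = vals.getD jn 0) :
    ∀ (l : List Int) (p c : Int), 0 ≤ p → l = vals.drop p.toNat →
      (PySem.List.pyRange p (pis.length : Int) 1).foldl
        (fun count i =>
          innerA nums k pis (PySem.List.pyGetD nums (PySem.List.pyGetD pis i 0) 0) i
            (PySem.List.pyRange (i + 1) (pis.length : Int) 1) count) c
        = c + G k l := by
  intro l
  induction l with
  | nil =>
    intro p c hp hdrop
    have hge : vals.length ≤ p.toNat := by
      have := (List.drop_eq_nil_iff).1 hdrop.symm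
      omega
    rw [PySem.List.pyRange_one_eq_nil (by omega)]
    simp [G]
  | cons v rest ih =>
    intro p c hp hdrop
    have hlt : p.toNat < vals.length := by
      by_contra hcon
      rw [List.drop_eq_nil_iff.2 (by omega)] at hdrop
      simp at hdrop
    have hpn : p < (pis.length : Int) := by omega
    rw [PySem.List.pyRange_one_cons hpn, List.foldl_cons]
    have hv : vals.getD p.toNat 0 = v := by
      rw [List.getD_eq_getElem _ _ hlt]
      have h0 : (vals.drop p.toNat)[0]'(by rw [← hdrop]; simp) = v := by
        simp [← hdrop]
      rw [List.getElem_drop] at h0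
      simpa using h0
    have hmin : PySem.List.pyGetD nums (PySem.List.pyGetD pis p 0) 0 = v := by
      have := hcompat p.toNat hlt
      rwa [Int.toNat_of_nonneg hp, hv] at this
    have hrest : rest = vals.drop (p + 1).toNat := by
      have : (p + 1).toNat = p.toNat + 1 := by omega
      rw [this, ← List.drop_drop, ← hdrop]
      simp
    rw [hmin,
      innerGen nums k pis vals hlen hcompat v p rest (p + 1) c (by omega) (by omega) hrest,
      ih (p + 1) _ (by omega) hrest]
    have h1 : p + 1 - p = 1 := by ring
    rw [h1]
    simp only [G]
    ring

theorem map_snd_filter_enumerate (nums : List Int) :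
    (((PySem.List.enumerate nums).filter (fun p => is_prime p.2)).map (·.2))
      = nums.filter (fun x => is_prime x) := by
  have h := List.filter_map (f := fun p : Int × Int => p.2)
    (p := fun x => is_prime x) (l := PySem.List.enumerate nums)
  rw [PySem.List.map_snd_enumerate] at h
  rw [h]
  rfl

set_option maxHeartbeats 1000000 in
theorem solve_eq_G (nums : List Int) (k : Int) :
    solve nums k = G k (nums.filter (fun x => is_prime x)) := by
  rw [← map_snd_filter_enumerate]
  simp only [solve]
  rw [outerGen nums k
    (((PySem.List.enumerate nums).filter (fun p => is_prime p.2)).map (·.1))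
    (((PySem.List.enumerate nums).filter (fun p => is_prime p.2)).map (·.2))
    (by simp)
    (compat' nums)
    (((PySem.List.enumerate nums).filter (fun p => is_prime p.2)).map (·.2))
    0 0 (by omega) (by simp), zero_add]

-- ===== VERDICT (by name: the statement is the Claim_ definition above) =====
theorem solve_spec : Claim_equal_solve := by
  intro nums k _
  unfold Spec_solve solve_alt
  rw [bLoop_eq, zero_add, solve_eq_G]
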